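-- pv_equiv track=rewrite | github.com/cyberconnecthq/surf-skills | skills/surf/scripts/gen_client.py | op_to_path
-- ===== SOURCE A (Python) =====
-- DOMAIN_PREFIXES = sorted(
--     [
--         "prediction-market", "polymarket", "kalshi",
--         "market", "wallet", "social", "token", "project",
--         "fund", "onchain", "news", "exchange", "search", "web",
--     ],
--     key=len,
--     reverse=True,
-- )
--
-- def op_to_path(op: str) -> str:
--     """Convert operation name to API path: 'market-price' → '/market/price'."""
--     for prefix in DOMAIN_PREFIXES:
--         if op == prefix:
--             return f"/{prefix}"
--         if op.startswith(prefix + "-"):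
--             rest = op[len(prefix) + 1:]
--             return f"/{prefix}/{rest}"
--     # Fallback: split at first hyphen.
--     parts = op.split("-", 1)
--     return "/" + "/".join(parts)
-- ===== SOURCE B (Python) =====
-- DOMAIN_PREFIXES = sorted(
--     [
--         "prediction-market", "polymarket", "kalshi",
--         "market", "wallet", "social", "token", "project",
--         "fund", "onchain", "news", "exchange", "search", "web",
--     ],
--     key=len,
--     reverse=True,
-- )
--
-- _PREFIX_SET = set(DOMAIN_PREFIXES)
-- _MAXN = max(p.count("-") + 1 for p in DOMAIN_PREFIXES)
--
-- def op_to_path(op: str) -> str: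
--     """Convert operation name to API path: 'market-price' → '/market/price'."""
--     segs = op.split("-")
--     for n in range(_MAXN, 0, -1):
--         cand = "-".join(segs[:n])
--         if cand in _PREFIX_SET:
--             if cand == op:
--                 return f"/{cand}"
--             return f"/{cand}/" + "-".join(segs[n:])
--     # Fallback: split at first hyphen.
--     parts = op.split("-", 1)
--     return "/" + "/".join(parts)
-- ===== Notes on version B (the rewrite author's own statement) =====
-- stated objective: idiomatic
-- what changed: Replaces the longest-first scan over all 14 prefixes (string-compare/startswith per prefix) by splitting op on hyphens once and looking up the joins of its first n segments (n from the data-derived max segment count down to 1) in a prefix set.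
import Mathlib
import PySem

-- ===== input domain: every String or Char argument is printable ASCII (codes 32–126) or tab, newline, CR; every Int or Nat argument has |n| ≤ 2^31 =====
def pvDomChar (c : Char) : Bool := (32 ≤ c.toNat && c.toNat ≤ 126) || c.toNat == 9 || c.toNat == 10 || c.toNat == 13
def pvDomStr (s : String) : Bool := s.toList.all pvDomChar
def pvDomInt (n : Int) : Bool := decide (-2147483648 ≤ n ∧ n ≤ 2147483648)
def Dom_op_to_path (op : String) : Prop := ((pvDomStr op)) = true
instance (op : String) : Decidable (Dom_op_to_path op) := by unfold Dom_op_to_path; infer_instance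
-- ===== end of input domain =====

-- B replaces A's longest-first scan over all 14 domain prefixes by splitting op on '-' once
-- and looking up the joins of its leading segments in a prefix set (idiomatic; same cost class).


-- ===== PORT A =====
def pvDOMAIN_PREFIXES : List String :=
  PySem.List.sorted ["prediction-market", "polymarket", "kalshi",
    "market", "wallet", "social", "token", "project",
    "fund", "onchain", "news", "exchange", "search", "web"]
    (fun s => PySem.Str.len s) true

def op_to_path_go (op : String) : List String → String
  | [] => "/" ++ PySem.Str.join "/" ((PySem.Str.splitMax? op "-" 1).getD [])
  | pfx :: rest =>
      if op == pfx then "/" ++ pfx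
      else if PySem.Str.startswith op (pfx ++ "-") then
        "/" ++ pfx ++ "/" ++ PySem.Str.slice op (some ((PySem.Str.len pfx : Int) + 1)) none
      else op_to_path_go op rest

def op_to_path (op : String) : String := op_to_path_go op pvDOMAIN_PREFIXES

-- ===== PORT B =====
def pvPREFIX_SET : PySem.Set String := PySem.Set.ofList pvDOMAIN_PREFIXES

def pvMAXN : Int :=
  (PySem.List.max? (pvDOMAIN_PREFIXES.map (fun p => (PySem.Str.count p "-" : Int) + 1)) (fun x => x)).getD 0

def op_to_path_alt_go (op : String) (segs : List String) : List Int → String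
  | [] => "/" ++ PySem.Str.join "/" ((PySem.Str.splitMax? op "-" 1).getD [])
  | n :: ns =>
      let cand := PySem.Str.join "-" (PySem.List.slice segs none (some n))
      if PySem.Set.contains pvPREFIX_SET cand then
        if cand == op then "/" ++ cand
        else "/" ++ cand ++ "/" ++ PySem.Str.join "-" (PySem.List.slice segs (some n) none)
      else op_to_path_alt_go op segs ns

def op_to_path_alt (op : String) : String :=
  op_to_path_alt_go op ((PySem.Str.split? op "-").getD []) (PySem.List.pyRange pvMAXN 0 (-1))

-- ===== PRECONDITION & SPEC =====
def Spec_op_to_path (op : String) (out : String) : Prop := out = op_to_path_alt op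
instance (op : String) (out : String) : Decidable (Spec_op_to_path op out) := by unfold Spec_op_to_path; infer_instance

-- ===== CLAIM (what is proved, stated in full; the proofs are below) =====
def Claim_equal_op_to_path : Prop := ∀ (op : String), Dom_op_to_path op → Spec_op_to_path op (op_to_path op)

-- ===== LEMMAS AND PROOFS =====

-- reference single-char split on '-', structural recursion (proof-only helper)
def pvSp : List Char → List (List Char)
  | [] => [[]]
  | c :: rest =>
      match pvSp rest with
      | [] => [[]]
      | h :: tl => if c = '-' then [] :: h :: tl else (c :: h) :: tl

theorem pvSp_ne_nil (l : List Char) : pvSp l ≠ [] := by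
  cases l with
  | nil => simp [pvSp]
  | cons c rest =>
      simp only [pvSp]
      rcases h : pvSp rest with _ | ⟨a, b⟩ <;> simp <;> split <;> simp

theorem pvGo_eq (fuel : Nat) (l cur : List Char) (acc : List (List Char)) (h : List Char)
    (tl : List (List Char)) (hf : l.length ≤ fuel) (hsp : pvSp l = h :: tl) :
    PySem.Chars.splitOn.go ['-'] fuel l cur acc = acc.reverse ++ (cur.reverse ++ h) :: tl := by
  induction fuel generalizing l cur acc h tl with
  | zero =>
      have : l = [] := by cases l <;> simp_all
      subst this
      simp [pvSp] at hsp
      simp [PySem.Chars.splitOn.go, hsp.1, ← hsp.2]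
  | succ f ih =>
      cases l with
      | nil =>
          simp [pvSp] at hsp
          simp [PySem.Chars.splitOn.go, hsp.1, ← hsp.2]
      | cons c rest =>
          by_cases hc : c = '-'
          · subst hc
            obtain ⟨h2, tl2, hsp2⟩ : ∃ h2 tl2, pvSp rest = h2 :: tl2 := by
              rcases e : pvSp rest with _ | ⟨a, b⟩
              · exact absurd e (pvSp_ne_nil rest)
              · exact ⟨a, b, rfl⟩
            have : PySem.Chars.splitOn.go ['-'] (f+1) ('-' :: rest) cur acc
                = PySem.Chars.splitOn.go ['-'] f rest [] (cur.reverse :: acc) := by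
              simp [PySem.Chars.splitOn.go, List.isPrefixOf]
            rw [this, ih rest [] (cur.reverse :: acc) h2 tl2 (by simpa using Nat.lt_succ_iff.mp (by simpa using hf)) hsp2]
            simp [pvSp, hsp2] at hsp
            obtain ⟨hh, htl⟩ := hsp
            subst hh; subst htl
            simp
          · have hne : ¬ ('-' = c) := fun e => hc e.symm
            have : PySem.Chars.splitOn.go ['-'] (f+1) (c :: rest) cur acc
                = PySem.Chars.splitOn.go ['-'] f rest (c :: cur) acc := by
              simp [PySem.Chars.splitOn.go, List.isPrefixOf, hne]
            obtain ⟨h2, tl2, hsp2⟩ : ∃ h2 tl2, pvSp rest = h2 :: tl2 := by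
              rcases e : pvSp rest with _ | ⟨a, b⟩
              · exact absurd e (pvSp_ne_nil rest)
              · exact ⟨a, b, rfl⟩
            rw [this, ih rest (c :: cur) acc h2 tl2 (by simpa using Nat.lt_succ_iff.mp (by simpa using hf)) hsp2]
            simp [pvSp, hsp2, hc] at hsp
            obtain ⟨hh, htl⟩ := hsp
            subst hh; subst htl
            simp

theorem pvSplitOn_eq (l : List Char) : PySem.Chars.splitOn l ['-'] = pvSp l := by
  obtain ⟨h, tl, hsp⟩ : ∃ h tl, pvSp l = h :: tl := by
    rcases e : pvSp l with _ | ⟨a, b⟩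
    · exact absurd e (pvSp_ne_nil l)
    · exact ⟨a, b, rfl⟩
  unfold PySem.Chars.splitOn
  rw [pvGo_eq (l.length + 1) l [] [] h tl (by omega) hsp, hsp]
  rfl

theorem pvSp_no (l : List Char) (h : ('-' : Char) ∉ l) : pvSp l = [l] := by
  induction l with
  | nil => simp [pvSp]
  | cons c rest ih =>
      simp at h
      have hc : ¬ c = '-' := fun e => h.1 e.symm
      simp [pvSp, ih h.2, hc]

theorem pvSp_append (a t : List Char) (ha : ('-' : Char) ∉ a) :
    pvSp (a ++ '-' :: t) = a :: pvSp t := by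
  induction a with
  | nil =>
      simp only [List.nil_append, pvSp]
      rcases e : pvSp t with _ | ⟨h, tl⟩
      · exact absurd e (pvSp_ne_nil t)
      · simp
  | cons c a' ih =>
      simp at ha
      have hc : ¬ c = '-' := fun e => ha.1 e.symm
      simp only [List.cons_append, pvSp, ih ha.2]
      simp [hc]

theorem pvJoin_pvSp (t : List Char) : PySem.Chars.join ['-'] (pvSp t) = t := by
  induction t with
  | nil => simp [pvSp, PySem.Chars.join_singleton]
  | cons c rest ih =>
      obtain ⟨h, tl, hsp⟩ : ∃ h tl, pvSp rest = h :: tl := by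
        rcases e : pvSp rest with _ | ⟨a, b⟩
        · exact absurd e (pvSp_ne_nil rest)
        · exact ⟨a, b, rfl⟩
      by_cases hc : c = '-'
      · subst hc
        simp only [pvSp, hsp, if_true]
        rw [PySem.Chars.join_cons_cons, ← hsp]
        simp [ih]
      · simp only [pvSp, hsp, if_neg hc]
        cases tl with
        | nil =>
            rw [PySem.Chars.join_singleton]
            rw [hsp] at ih; rw [PySem.Chars.join_singleton] at ih
            simp [ih]
        | cons x xs =>
            rw [PySem.Chars.join_cons_cons]
            rw [hsp, PySem.Chars.join_cons_cons] at ih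
            simp only [List.cons_append, ih]

theorem pvGoM_zero (fuel : Nat) (l cur : List Char) (acc : List (List Char)) :
    PySem.Chars.splitOnMax.go ['-'] fuel 0 l cur acc = acc.reverse ++ [cur.reverse ++ l] := by
  cases fuel with
  | zero => simp [PySem.Chars.splitOnMax.go]
  | succ f => cases l <;> simp [PySem.Chars.splitOnMax.go]

theorem pvGoM_one_no (fuel : Nat) : ∀ (l cur : List Char) (acc : List (List Char)),
    ('-' : Char) ∉ l → l.length ≤ fuel →
    PySem.Chars.splitOnMax.go ['-'] fuel 1 l cur acc = acc.reverse ++ [cur.reverse ++ l] := by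
  induction fuel with
  | zero =>
      intro l cur acc _ hf
      have : l = [] := by cases l <;> simp_all
      subst this; simp [PySem.Chars.splitOnMax.go]
  | succ f ih =>
      intro l cur acc hl hf
      cases l with
      | nil => simp [PySem.Chars.splitOnMax.go]
      | cons c rest =>
          simp at hl
          have hne : ¬ ('-' = c) := hl.1
          have : PySem.Chars.splitOnMax.go ['-'] (f+1) 1 (c :: rest) cur acc
              = PySem.Chars.splitOnMax.go ['-'] f 1 rest (c :: cur) acc := by
            simp [PySem.Chars.splitOnMax.go, List.isPrefixOf, hne]
          rw [this, ih rest (c :: cur) acc hl.2 (by simpa using Nat.lt_succ_iff.mp (by simpa using hf))]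
          simp

theorem pvGoM_one_yes (a : List Char) : ∀ (fuel : Nat) (t cur : List Char) (acc : List (List Char)),
    ('-' : Char) ∉ a → (a ++ '-' :: t).length ≤ fuel →
    PySem.Chars.splitOnMax.go ['-'] fuel 1 (a ++ '-' :: t) cur acc
      = acc.reverse ++ [cur.reverse ++ a, t] := by
  induction a with
  | nil =>
      intro fuel t cur acc _ hf
      cases fuel with
      | zero => simp at hf
      | succ f =>
          have : PySem.Chars.splitOnMax.go ['-'] (f+1) 1 ('-' :: t) cur acc
              = PySem.Chars.splitOnMax.go ['-'] f 0 t [] (cur.reverse :: acc) := by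
            simp [PySem.Chars.splitOnMax.go, List.isPrefixOf]
          rw [List.nil_append, this, pvGoM_zero]
          simp
  | cons c a' ih =>
      intro fuel t cur acc ha hf
      simp at ha
      cases fuel with
      | zero => simp at hf
      | succ f =>
          have hne : ¬ ('-' = c) := ha.1
          have : PySem.Chars.splitOnMax.go ['-'] (f+1) 1 ((c :: a') ++ '-' :: t) cur acc
              = PySem.Chars.splitOnMax.go ['-'] f 1 (a' ++ '-' :: t) (c :: cur) acc := by
            simp [PySem.Chars.splitOnMax.go, List.isPrefixOf, hne]
          rw [this, ih f t (c :: cur) acc ha.2 (by simp at hf ⊢; omega)]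
          simp

theorem pvSplitOnMax1_no (l : List Char) (h : ('-' : Char) ∉ l) :
    PySem.Chars.splitOnMax l ['-'] 1 = [l] := by
  unfold PySem.Chars.splitOnMax
  rw [if_neg (by norm_num)]
  rw [show (Int.toNat 1) = 1 from rfl]
  rw [pvGoM_one_no (l.length + 1) l [] [] h (by omega)]
  simp

theorem pvSplitOnMax1_yes (a t : List Char) (ha : ('-' : Char) ∉ a) :
    PySem.Chars.splitOnMax (a ++ '-' :: t) ['-'] 1 = [a, t] := by
  unfold PySem.Chars.splitOnMax
  rw [if_neg (by norm_num)]
  rw [show (Int.toNat 1) = 1 from rfl]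
  rw [pvGoM_one_yes a ((a ++ '-' :: t).length + 1) t [] [] ha (by omega)]
  simp

theorem pvDecomp (l : List Char) (h : ('-' : Char) ∈ l) :
    ∃ a t, l = a ++ '-' :: t ∧ ('-' : Char) ∉ a := by
  induction l with
  | nil => simp at h
  | cons c rest ih =>
      by_cases hc : c = '-'
      · exact ⟨[], rest, by simp [hc], by simp⟩
      · have : ('-' : Char) ∈ rest := by
          rcases List.mem_cons.mp h with e | e
          · exact absurd (Eq.symm e) hc
          · exact e
        obtain ⟨a, t, he, hna⟩ := ih this
        refine ⟨c :: a, t, by simp [he], ?_⟩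
        simp [hna]
        exact fun e => hc (Eq.symm e)

theorem pvPrefixUnique (p : List Char) : ∀ (a t : List Char), ('-' : Char) ∉ p → ('-' : Char) ∉ a →
    (p ++ ['-']) <+: (a ++ '-' :: t) → p = a := by
  induction p with
  | nil =>
      intro a t _ ha hpre
      cases a with
      | nil => rfl
      | cons c a' =>
          obtain ⟨w, hw⟩ := hpre
          simp at hw ha
          exact absurd (Eq.symm hw.1) (fun e => ha.1 (Eq.symm e))
  | cons c p' ih =>
      intro a t hp ha hpre
      simp at hp
      cases a with
      | nil =>
          obtain ⟨w, hw⟩ := hpre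
          simp at hw
          exact absurd hw.1 (fun e => hp.1 (Eq.symm e))
      | cons d a' =>
          obtain ⟨w, hw⟩ := hpre
          simp at hw ha
          obtain ⟨hcd, hw2⟩ := hw
          have : p' = a' := ih a' t hp.2 ha.2 ⟨w, by simpa using hw2⟩
          simp [hcd, this]

-- ===== string-level helpers =====

theorem pvSegs_eq (op : String) :
    (PySem.Str.split? op "-").getD [] = (pvSp op.toList).map String.ofList := by
  have h := PySem.Str.split?_map op "-"
  have h2 : PySem.Chars.split? op.toList "-".toList = some (pvSp op.toList) := by
    simp [PySem.Chars.split?, pvSplitOn_eq]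
  rw [h2] at h
  rcases e : PySem.Str.split? op "-" with _ | xs
  · rw [e] at h; simp at h
  · rw [e] at h
    simp at h ⊢
    have : (xs.map String.toList).map String.ofList = (pvSp op.toList).map String.ofList := by rw [h]
    simpa [List.map_map, Function.comp_def, String.ofList_toList] using this

theorem pvSplitMax_eq (op : String) :
    (PySem.Str.splitMax? op "-" 1).getD [] = (PySem.Chars.splitOnMax op.toList ['-'] 1).map String.ofList := by
  have h := PySem.Str.splitMax?_map op "-" 1
  have h2 : PySem.Chars.splitMax? op.toList "-".toList 1 = some (PySem.Chars.splitOnMax op.toList ['-'] 1) := by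
    simp [PySem.Chars.splitMax?]
  rw [h2] at h
  rcases e : PySem.Str.splitMax? op "-" 1 with _ | xs
  · rw [e] at h; simp at h
  · rw [e] at h
    simp at h ⊢
    have : (xs.map String.toList).map String.ofList = (PySem.Chars.splitOnMax op.toList ['-'] 1).map String.ofList := by rw [h]
    simpa [List.map_map, Function.comp_def, String.ofList_toList] using this

theorem pvStrEq (s t : String) (h : s.toList = t.toList) : s = t := String.toList_inj.mp h

-- ===== more string-level bridges =====

theorem pvJoin_map_ofList (sep : String) (ls : List (List Char)) :
    (PySem.Str.join sep (ls.map String.ofList)).toList = PySem.Chars.join sep.toList ls := by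
  simp [List.map_map, Function.comp_def, String.toList_ofList]

theorem pvJoinDash_pvSp (t : List Char) :
    PySem.Str.join "-" ((pvSp t).map String.ofList) = String.ofList t := by
  apply pvStrEq
  rw [pvJoin_map_ofList]
  simp [pvJoin_pvSp]

theorem pvStrJoin_singleton (sep : String) (x : String) : PySem.Str.join sep [x] = x := by
  apply pvStrEq
  have : ([x]).map String.toList = [x.toList] := by simp
  simp [PySem.Chars.join_singleton]

theorem pvFallback_no (op : String) (h : ('-' : Char) ∉ op.toList) :
    "/" ++ PySem.Str.join "/" ((PySem.Str.splitMax? op "-" 1).getD []) = "/" ++ op := by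
  rw [pvSplitMax_eq, pvSplitOnMax1_no op.toList h]
  simp [pvStrJoin_singleton]

theorem pvFallback_yes (op : String) (a t : List Char) (hop : op.toList = a ++ '-' :: t)
    (ha : ('-' : Char) ∉ a) :
    "/" ++ PySem.Str.join "/" ((PySem.Str.splitMax? op "-" 1).getD [])
      = "/" ++ String.ofList a ++ "/" ++ String.ofList t := by
  rw [pvSplitMax_eq, hop, pvSplitOnMax1_yes a t ha]
  apply pvStrEq
  simp only [String.toList_append, pvJoin_map_ofList]
  rw [PySem.Chars.join_cons_cons, PySem.Chars.join_singleton]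
  simp

theorem pvStartswith_iff (op p : String) :
    PySem.Str.startswith op p = true ↔ p.toList <+: op.toList := by
  simp [PySem.Chars.startswith_iff]

theorem pvContains_hyphen (c : String) (h : ('-' : Char) ∈ c.toList) :
    PySem.Set.contains pvPREFIX_SET c = true ↔ c = "prediction-market" := by
  have hset : pvPREFIX_SET = ["prediction-market","polymarket","exchange","project","onchain",
      "kalshi","market","wallet","social","search","token","fund","news","web"] := by decide
  rw [hset]
  simp only [PySem.Set.contains, List.contains_eq_mem, decide_eq_true_eq, List.mem_cons,
    List.not_mem_nil, or_false]
  constructor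
  · rintro (rfl|rfl|rfl|rfl|rfl|rfl|rfl|rfl|rfl|rfl|rfl|rfl|rfl|rfl) <;>
      first
        | rfl
        | exact absurd h (by decide)
  · intro he
    exact Or.inl he

theorem pvNeOfToListLen (s t : String) (h : s.toList.length ≠ t.toList.length) : ¬ (s = t) := by
  intro e
  exact h (by rw [e])

-- ===== main case lemmas =====

theorem pvA_nohyph (op : String) (h : ('-' : Char) ∉ op.toList) (ps : List String) :
    op_to_path_go op ps = "/" ++ op := by
  induction ps with
  | nil => exact pvFallback_no op h
  | cons p rest ih =>
      simp only [op_to_path_go]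
      by_cases hb : op = p
      · simp [hb]
      · rw [if_neg (by simpa using hb)]
        have hs : ¬ (PySem.Str.startswith op (p ++ "-") = true) := by
          rw [pvStartswith_iff]
          intro hpre
          exact h (hpre.subset (by simp))
        rw [if_neg hs]
        exact ih

theorem pvB_nohyph (op : String) (h : ('-' : Char) ∉ op.toList) :
    op_to_path_alt op = "/" ++ op := by
  unfold op_to_path_alt
  rw [show PySem.List.pyRange pvMAXN 0 (-1) = [2, 1] from by decide]
  rw [pvSegs_eq, pvSp_no op.toList h]
  have hsegs : ([op.toList]).map String.ofList = [op] := by simp [String.ofList_toList]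
  rw [hsegs]
  have hcand2 : PySem.Str.join "-" (PySem.List.slice [op] none (some 2)) = op := by
    rw [PySem.List.slice_to _ (by norm_num)]
    simp [pvStrJoin_singleton]
  have hcand1 : PySem.Str.join "-" (PySem.List.slice [op] none (some 1)) = op := by
    rw [PySem.List.slice_to _ (by norm_num)]
    simp [pvStrJoin_singleton]
  simp only [op_to_path_alt_go, hcand2, hcand1]
  by_cases hc : PySem.Set.contains pvPREFIX_SET op = true
  · rw [if_pos hc]
    simp
  · rw [if_neg hc, if_neg hc]
    exact pvFallback_no op h

theorem pvA_singles (op : String) (a t : List Char) (hop : op.toList = a ++ '-' :: t)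
    (ha : ('-' : Char) ∉ a) (ps : List String) (hps : ∀ p ∈ ps, ('-' : Char) ∉ p.toList) :
    op_to_path_go op ps = "/" ++ String.ofList a ++ "/" ++ String.ofList t := by
  induction ps with
  | nil => exact pvFallback_yes op a t hop ha
  | cons p rest ih =>
      simp only [op_to_path_go]
      have hpnh : ('-' : Char) ∉ p.toList := hps p (by simp)
      have hne : ¬ (op = p) := by
        intro e
        apply hpnh
        rw [← e, hop]
        simp
      rw [if_neg (by simpa using hne)]
      by_cases hs : PySem.Str.startswith op (p ++ "-") = true
      · rw [if_pos hs]
        rw [pvStartswith_iff] at hs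
        have hpre : (p.toList ++ ['-']) <+: (a ++ '-' :: t) := by
          rw [← hop]
          simpa using hs
        have hpa : p.toList = a := pvPrefixUnique p.toList a t hpnh ha hpre
        have hp : p = String.ofList a := pvStrEq _ _ (by simp [hpa])
        have hslice : PySem.Str.slice op (some ((PySem.Str.len p : Int) + 1)) none = String.ofList t := by
          apply pvStrEq
          have hlen : PySem.Str.len p = p.toList.length := by simp
          have h2 : (PySem.Str.slice op (some ((PySem.Str.len p : Int) + 1)) none).toList
              = PySem.List.slice op.toList (some ((PySem.Str.len p : Int) + 1)) none := by simp
          rw [h2, PySem.List.slice_from _ (by simp; omega)]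
          have h3 : ((PySem.Str.len p : Int) + 1).toNat = p.toList.length + 1 := by
            rw [hlen]; omega
          rw [h3, hpa, hop]
          rw [show a ++ '-' :: t = (a ++ ['-']) ++ t from by simp]
          rw [show a.length + 1 = (a ++ ['-']).length from by simp]
          rw [List.drop_left]
          simp
        rw [hslice, hp]
      · rw [if_neg hs]
        exact ih (fun q hq => hps q (by simp [hq]))

theorem pvLit : pvDOMAIN_PREFIXES = ["prediction-market","polymarket","exchange","project","onchain",
    "kalshi","market","wallet","social","search","token","fund","news","web"] := by decide

theorem pvPMtoList : "prediction-market".toList = "prediction".toList ++ '-' :: "market".toList := by decide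

theorem pvA_b (op : String) (u : List Char)
    (hu : op.toList = "prediction-market".toList ++ '-' :: u) (hPM : op ≠ "prediction-market") :
    op_to_path op = "/" ++ "prediction-market" ++ "/" ++ String.ofList u := by
  unfold op_to_path
  rw [pvLit]
  simp only [op_to_path_go]
  rw [if_neg (by simpa using hPM)]
  have hsw : PySem.Str.startswith op ("prediction-market" ++ "-") = true := by
    rw [pvStartswith_iff, hu]
    refine ⟨u, ?_⟩
    simp
  rw [if_pos hsw]
  have hslice : PySem.Str.slice op (some ((PySem.Str.len "prediction-market" : Int) + 1)) none
      = String.ofList u := by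
    apply pvStrEq
    have h2 : (PySem.Str.slice op (some ((PySem.Str.len "prediction-market" : Int) + 1)) none).toList
        = PySem.List.slice op.toList (some ((PySem.Str.len "prediction-market" : Int) + 1)) none := by simp
    have hlen : PySem.Str.len "prediction-market" = 17 := by decide
    rw [h2, hlen, PySem.List.slice_from _ (by norm_num)]
    rw [show (((17 : Int) + 1).toNat) = 18 from rfl]
    rw [hu]
    rw [show "prediction-market".toList ++ '-' :: u = ("prediction-market".toList ++ ['-']) ++ u from by simp]
    rw [show 18 = ("prediction-market".toList ++ ['-']).length from by decide]
    rw [List.drop_left]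
    simp
  rw [hslice]

theorem pvB_b (op : String) (u : List Char)
    (hu : op.toList = "prediction-market".toList ++ '-' :: u) :
    op_to_path_alt op = "/" ++ "prediction-market" ++ "/" ++ String.ofList u := by
  have h17 : "prediction-market".toList.length = 17 := by decide
  have hPM : ¬ (op = "prediction-market") := by
    apply pvNeOfToListLen
    rw [hu]
    simp
  have hop' : op.toList = "prediction".toList ++ '-' :: ("market".toList ++ '-' :: u) := by
    rw [hu, pvPMtoList]
    simp
  unfold op_to_path_alt
  rw [show PySem.List.pyRange pvMAXN 0 (-1) = [2, 1] from by decide]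
  rw [pvSegs_eq, hop', pvSp_append _ _ (by decide), pvSp_append _ _ (by decide)]
  rw [show ("prediction".toList :: "market".toList :: pvSp u).map String.ofList
      = "prediction" :: "market" :: (pvSp u).map String.ofList from by
    simp]
  simp only [op_to_path_alt_go]
  have htake : PySem.List.slice ("prediction" :: "market" :: (pvSp u).map String.ofList) none (some 2)
      = ["prediction", "market"] := by
    rw [PySem.List.slice_to _ (by norm_num)]
    rfl
  have hcand : PySem.Str.join "-" ["prediction", "market"] = "prediction-market" := by decide
  rw [htake, hcand]
  rw [if_pos (by decide)]
  rw [if_neg (by simpa using fun e => hPM (Eq.symm e))]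
  have hdrop : PySem.List.slice ("prediction" :: "market" :: (pvSp u).map String.ofList) (some 2) none
      = (pvSp u).map String.ofList := by
    rw [PySem.List.slice_from _ (by norm_num)]
    rfl
  rw [hdrop, pvJoinDash_pvSp]

theorem pvB_c (op : String) (a t : List Char) (hop : op.toList = a ++ '-' :: t)
    (ha : ('-' : Char) ∉ a) (hPM : ¬ (op = "prediction-market"))
    (hnb : ∀ u, op.toList ≠ "prediction-market".toList ++ '-' :: u) :
    op_to_path_alt op = "/" ++ String.ofList a ++ "/" ++ String.ofList t := by
  obtain ⟨h1, tl, hsp⟩ : ∃ h1 tl, pvSp t = h1 :: tl := by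
    rcases e : pvSp t with _ | ⟨x, y⟩
    · exact absurd e (pvSp_ne_nil t)
    · exact ⟨x, y, rfl⟩
  unfold op_to_path_alt
  rw [show PySem.List.pyRange pvMAXN 0 (-1) = [2, 1] from by decide]
  rw [pvSegs_eq, hop, pvSp_append _ _ ha, hsp]
  simp only [List.map_cons, op_to_path_alt_go]
  have htake2 : PySem.List.slice (String.ofList a :: String.ofList h1 :: tl.map String.ofList) none (some 2)
      = [String.ofList a, String.ofList h1] := by
    rw [PySem.List.slice_to _ (by norm_num)]
    rfl
  rw [htake2]
  have hc2toList : (PySem.Str.join "-" [String.ofList a, String.ofList h1]).toList = a ++ '-' :: h1 := by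
    rw [show [String.ofList a, String.ofList h1] = ([a, h1]).map String.ofList from by simp]
    rw [pvJoin_map_ofList, PySem.Chars.join_cons_cons, PySem.Chars.join_singleton]
    simp
  have hc2 : ¬ (PySem.Set.contains pvPREFIX_SET (PySem.Str.join "-" [String.ofList a, String.ofList h1]) = true) := by
    intro hc
    have hmem : ('-' : Char) ∈ (PySem.Str.join "-" [String.ofList a, String.ofList h1]).toList := by
      rw [hc2toList]; simp
    have := (pvContains_hyphen _ hmem).mp hc
    have heq : a ++ '-' :: h1 = "prediction".toList ++ '-' :: "market".toList := by
      rw [← hc2toList, this, pvPMtoList]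
    have hpa : a = "prediction".toList := by
      apply pvPrefixUnique a "prediction".toList "market".toList ha (by decide)
      refine ⟨h1, ?_⟩
      rw [← heq]
      simp
    rw [hpa] at heq
    have hh1 : h1 = "market".toList := by
      have := List.append_cancel_left heq
      simpa using this
    have ht : t = PySem.Chars.join ['-'] (h1 :: tl) := by
      rw [← hsp, pvJoin_pvSp]
    cases tl with
    | nil =>
        rw [PySem.Chars.join_singleton, hh1] at ht
        apply hPM
        apply pvStrEq
        rw [hop, hpa, ht, ← pvPMtoList]
    | cons x xs =>
        rw [PySem.Chars.join_cons_cons, hh1] at ht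
        apply hnb (PySem.Chars.join ['-'] (x :: xs))
        rw [hop, hpa, ht, pvPMtoList]
        simp
  rw [if_neg hc2]
  have htake1 : PySem.List.slice (String.ofList a :: String.ofList h1 :: tl.map String.ofList) none (some 1)
      = [String.ofList a] := by
    rw [PySem.List.slice_to _ (by norm_num)]
    rfl
  rw [htake1, pvStrJoin_singleton]
  have hdrop1 : PySem.List.slice (String.ofList a :: String.ofList h1 :: tl.map String.ofList) (some 1) none
      = (pvSp t).map String.ofList := by
    rw [PySem.List.slice_from _ (by norm_num), hsp]
    rfl
  have hne : ¬ (String.ofList a = op) := by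
    intro e
    have : a = a ++ '-' :: t := by
      conv_lhs => rw [← String.toList_ofList (l := a)]
      rw [e, hop]
    have := congrArg List.length this
    simp at this
  by_cases hc1 : PySem.Set.contains pvPREFIX_SET (String.ofList a) = true
  · rw [if_pos hc1, if_neg (by simpa using hne), hdrop1, pvJoinDash_pvSp]
  · rw [if_neg hc1]
    exact pvFallback_yes op a t hop ha

theorem pvMain : ∀ (op : String), op_to_path op = op_to_path_alt op := by
  intro op
  by_cases hh : ('-' : Char) ∈ op.toList
  · obtain ⟨a, t, hop, ha⟩ := pvDecomp op.toList hh
    by_cases hPM : op = "prediction-market"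
    · subst hPM
      decide
    · by_cases hsw : PySem.Str.startswith op ("prediction-market" ++ "-") = true
      · obtain ⟨u, hu⟩ : ∃ u, op.toList = "prediction-market".toList ++ '-' :: u := by
          rw [pvStartswith_iff] at hsw
          obtain ⟨w, hw⟩ := hsw
          refine ⟨w, ?_⟩
          rw [← hw]
          simp
        rw [pvA_b op u hu hPM, pvB_b op u hu]
      · have hnb : ∀ u, op.toList ≠ "prediction-market".toList ++ '-' :: u := by
          intro u e
          apply hsw
          rw [pvStartswith_iff, e]
          refine ⟨u, ?_⟩
          simp
        rw [pvB_c op a t hop ha hPM hnb]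
        unfold op_to_path
        rw [pvLit]
        simp only [op_to_path_go]
        rw [if_neg (by simpa using hPM), if_neg hsw]
        exact pvA_singles op a t hop ha ["polymarket","exchange","project","onchain","kalshi",
          "market","wallet","social","search","token","fund","news","web"] (by decide)
  · rw [pvB_nohyph op hh]
    unfold op_to_path
    exact pvA_nohyph op hh pvDOMAIN_PREFIXES

-- ===== VERDICT (by name: the statement is the Claim_ definition above) =====
theorem op_to_path_spec : Claim_equal_op_to_path := by
  intro op _
  unfold Spec_op_to_path
  exact pvMain op
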